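-- pv_equiv track=rewrite | github.com/morkcoin2024/mork-fetch-testbot | bot.py | is_valid_solana_address
-- ===== SOURCE A (Python) =====
-- def is_valid_solana_address(address):
--     """Validate Solana contract address format"""
--     if not address:
--         return False
--
--     # Trim whitespace
--     address = address.strip()
--
--     # Solana addresses are typically 32-44 characters, but let's be more flexible
--     if len(address) < 32 or len(address) > 50:
--         return False
--
--     # Base58 character check (Bitcoin alphabet without 0, O, I, l)
--     valid_chars = "123456789ABCDEFGHJKLMNPQRSTUVWXYZabcdefghijkmnopqrstuvwxyz"
--
--     # Check if all characters are valid Base58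
--     if not all(char in valid_chars for char in address):
--         return False
--
--     # Additional check: Solana addresses shouldn't contain ambiguous characters
--     forbidden_chars = "0OIl"
--     if any(char in forbidden_chars for char in address):
--         return False
--
--     return True
-- ===== SOURCE B (Python) =====
-- import re
--
-- _SOLANA_RE = re.compile(r"[1-9A-HJ-NP-Za-km-z]{32,50}")
--
-- def is_valid_solana_address(address):
--     """Validate Solana contract address format"""
--     if not address:
--         return False
--     return bool(_SOLANA_RE.fullmatch(address.strip()))
-- ===== Notes on version B (the rewrite author's own statement) =====
-- stated objective: idiomatic
-- what changed: Replaces the explicit length check, the all()-loop over a 58-character alphabet string and the redundant any()-loop over forbidden characters with a single precompiled regex fullmatch of [1-9A-HJ-NP-Za-km-z]{32,50}; the forbidden-chars pass is dropped as provably dead since 0/O/I/l are not Base58 characters.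
import Mathlib
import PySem

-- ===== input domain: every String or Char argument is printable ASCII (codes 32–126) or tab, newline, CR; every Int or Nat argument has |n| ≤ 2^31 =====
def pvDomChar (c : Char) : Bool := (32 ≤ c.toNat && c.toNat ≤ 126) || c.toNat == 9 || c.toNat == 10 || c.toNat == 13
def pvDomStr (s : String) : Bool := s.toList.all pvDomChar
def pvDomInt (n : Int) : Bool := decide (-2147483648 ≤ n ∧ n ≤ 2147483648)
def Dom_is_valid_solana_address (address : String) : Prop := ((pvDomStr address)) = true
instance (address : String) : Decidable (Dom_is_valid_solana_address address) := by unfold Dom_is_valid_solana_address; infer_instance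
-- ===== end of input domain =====

-- B replaces A's two alphabet-scanning loops (and the dead forbidden-chars pass) by a single
-- character-class + length test, the port of Source B's regex fullmatch [1-9A-HJ-NP-Za-km-z]{32,50}.


-- ===== PORT A =====
def pvValidChars : List Char := "123456789ABCDEFGHJKLMNPQRSTUVWXYZabcdefghijkmnopqrstuvwxyz".toList
def pvForbiddenChars : List Char := "0OIl".toList

def is_valid_solana_address (address : String) : Bool :=
  if address = "" then false
  else
    let a := (PySem.Str.strip address).toList
    if a.length < 32 || a.length > 50 then false
    else if !(a.all (fun c => pvValidChars.contains c)) then false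
    else if a.any (fun c => pvForbiddenChars.contains c) then false
    else true

-- ===== PORT B =====
-- the regex character class [1-9A-HJ-NP-Za-km-z], ported range for range (exact: Char order is by code point)
def pvBase58Char (c : Char) : Bool :=
  ('1' ≤ c && c ≤ '9') || ('A' ≤ c && c ≤ 'H') || ('J' ≤ c && c ≤ 'N') ||
  ('P' ≤ c && c ≤ 'Z') || ('a' ≤ c && c ≤ 'k') || ('m' ≤ c && c ≤ 'z')

-- fullmatch of [class]{32,50}: every character in the class and the length within 32..50 (exact)
def is_valid_solana_address_alt (address : String) : Bool :=
  if address = "" then false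
  else
    let a := (PySem.Str.strip address).toList
    decide (32 ≤ a.length) && decide (a.length ≤ 50) && a.all pvBase58Char

-- ===== PRECONDITION & SPEC =====
def Spec_is_valid_solana_address (address : String) (out : Bool) : Prop := out = is_valid_solana_address_alt address
instance (address : String) (out : Bool) : Decidable (Spec_is_valid_solana_address address out) := by unfold Spec_is_valid_solana_address; infer_instance

-- ===== CLAIM (what is proved, stated in full; the proofs are below) =====
def Claim_equal_is_valid_solana_address : Prop := ∀ (address : String), Dom_is_valid_solana_address address → Spec_is_valid_solana_address address (is_valid_solana_address address)

-- ===== LEMMAS AND PROOFS =====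

theorem pv_valid_eq_base58 (c : Char) : pvValidChars.contains c = pvBase58Char c := by
  have hv : pvValidChars = ['1','2','3','4','5','6','7','8','9','A','B','C','D','E','F','G','H','J','K','L','M','N','P','Q','R','S','T','U','V','W','X','Y','Z','a','b','c','d','e','f','g','h','i','j','k','m','n','o','p','q','r','s','t','u','v','w','x','y','z'] := by rfl
  rw [hv, Bool.eq_iff_iff]
  simp only [pvBase58Char, List.contains_eq_mem, List.mem_cons, List.not_mem_nil, or_false,
    decide_eq_true_eq, Bool.or_eq_true, Bool.and_eq_true, Char.le_def, Char.ext_iff,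
    UInt32.le_iff_toNat_le, UInt32.ext_iff, Char.reduceVal, UInt32.reduceToNat]
  omega

theorem pv_all_congr (l : List Char) :
    (l.all (fun c => pvValidChars.contains c)) = l.all pvBase58Char := by
  simp only [pv_valid_eq_base58]

theorem pv_base58_not_forbidden (c : Char) (h : pvBase58Char c = true) :
    pvForbiddenChars.contains c = false := by
  have hf : pvForbiddenChars = ['0','O','I','l'] := by rfl
  rw [hf]
  simp only [pvBase58Char, Bool.or_eq_true, Bool.and_eq_true, decide_eq_true_eq, Char.le_def,
    UInt32.le_iff_toNat_le, Char.reduceVal, UInt32.reduceToNat] at h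
  simp only [List.contains_eq_mem, List.mem_cons, List.not_mem_nil, or_false,
    decide_eq_false_iff_not, Char.ext_iff, UInt32.ext_iff, Char.reduceVal, UInt32.reduceToNat]
  omega

theorem pv_any_forbidden_false (l : List Char) (h : l.all pvBase58Char = true) :
    l.any (fun c => pvForbiddenChars.contains c) = false := by
  induction l with
  | nil => rfl
  | cons x xs ih =>
    simp only [List.all_cons, Bool.and_eq_true] at h
    simp only [List.any_cons, pv_base58_not_forbidden x h.1, ih h.2, Bool.or_self]

-- ===== VERDICT (by name: the statement is the Claim_ definition above) =====
theorem is_valid_solana_address_spec : Claim_equal_is_valid_solana_address := by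
  intro address _
  unfold Spec_is_valid_solana_address is_valid_solana_address is_valid_solana_address_alt
  by_cases he : address = ""
  · simp [he]
  · simp only [he, if_false]
    set a := (PySem.Str.strip address).toList with ha
    by_cases hlen : a.length < 32 ∨ a.length > 50
    · have hb : (a.length < 32 || a.length > 50) = true := by
        simp only [Bool.or_eq_true, decide_eq_true_eq]; exact hlen
      rw [if_pos hb]
      rcases hlen with h | h <;> simp <;> omega
    · push Not at hlen
      have hb : (a.length < 32 || a.length > 50) = false := by
        simp only [Bool.or_eq_false_iff, decide_eq_false_iff_not]
        omega
      rw [if_neg (by simp [hb])]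
      by_cases hal : a.all pvBase58Char = true
      · rw [pv_all_congr a, hal, pv_any_forbidden_false a hal]
        simp [hlen.1, hlen.2]
      · rw [pv_all_congr a]
        simp only [Bool.not_eq_true] at hal
        simp [hal]
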